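-- pv_equiv track=rewrite | github.com/Yerinnnn/Algorithm | 백준/Gold/14890. 경사로/경사로.py | can_travel
-- ===== SOURCE A (Python) =====
-- def can_travel(line, L):
--     n = len(line)
--     used = [False] * n  # 경사로 설치 여부 기록
--
--     for i in range(n - 1):
--         if line[i] == line[i + 1]:  # 높이가 같으면 계속 진행
--             continue
--         elif line[i] + 1 == line[i + 1]:  # 올라가는 경사로 설치
--             for j in range(i, i - L, -1):  # 이전 L칸 확인
--                 if j < 0 or line[j] != line[i] or used[j]:
--                     return False
--                 used[j] = True
--         elif line[i] - 1 == line[i + 1]:  # 내려가는 경사로 설치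
--             for j in range(i + 1, i + L + 1):  # 이후 L칸 확인
--                 if j >= n or line[j] != line[i + 1] or used[j]:
--                     return False
--                 used[j] = True
--         else:  # 높이 차이가 1보다 크면 이동 불가능
--             return False
--     return True
-- ===== SOURCE B (Python) =====
-- def can_travel(line, L):
--     # One pass over adjacent pairs, tracking the current equal-height run length
--     # and how many of its leading cells were consumed by a downward ramp.
--     if not line:
--         return True
--     prev = line[0]
--     run = 1        # length of the current equal-height run seen so far
--     consumed = 0   # leading cells of this run consumed by the previous down-ramp
--     for x in line[1:]:
--         d = x - prev
--         if d == 0: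
--             run += 1
--         elif d == 1:
--             if run - consumed < L:   # up-ramp needs L free cells at the run's tail
--                 return False
--             run, consumed = 1, 0
--         elif d == -1:
--             if run < consumed:       # previous down-ramp did not fit in this run
--                 return False
--             run, consumed = 1, L     # down-ramp consumes L cells of the new run
--         else:
--             return False
--         prev = x
--     return run >= consumed
-- ===== Notes on version B (the rewrite author's own statement) =====
-- stated objective: alternative
-- what changed: Replaced the used[] array and the inner L-cell scans at every height boundary by a single pass over adjacent pairs that tracks the current run length and the number of its cells consumed by the previous down-ramp.
import Mathlib
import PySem

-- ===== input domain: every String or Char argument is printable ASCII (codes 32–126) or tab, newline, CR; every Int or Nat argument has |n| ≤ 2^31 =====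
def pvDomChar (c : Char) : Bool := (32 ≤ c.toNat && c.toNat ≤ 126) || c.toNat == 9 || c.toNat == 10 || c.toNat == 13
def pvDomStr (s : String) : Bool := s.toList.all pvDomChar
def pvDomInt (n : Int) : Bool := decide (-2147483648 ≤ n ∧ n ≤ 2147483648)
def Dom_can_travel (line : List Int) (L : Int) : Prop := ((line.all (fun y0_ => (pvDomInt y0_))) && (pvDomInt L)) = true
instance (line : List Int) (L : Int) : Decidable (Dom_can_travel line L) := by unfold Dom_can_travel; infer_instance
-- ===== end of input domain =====

-- B replaces A's used[] bookkeeping and the inner L-cell scan at every boundary by a single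
-- pass over adjacent pairs tracking the current run length and its consumed prefix.


-- ===== PORT A =====
-- A, transliterated: outer loop over range(n-1) carrying the mutable used list;
-- the two inner ramp-check loops are can_travel_up / can_travel_down (none = 'return False').
def can_travel_up (line : List Int) (i : Int) : List Int → List Bool → Option (List Bool)
  | [], used => some used
  | j :: js, used =>
    if j < 0 ∨ PySem.List.pyGetD line j 0 ≠ PySem.List.pyGetD line i 0 ∨ PySem.List.pyGetD used j false = true then
      none
    else can_travel_up line i js (PySem.List.pySetD used j true)

def can_travel_down (line : List Int) (n i : Int) : List Int → List Bool → Option (List Bool)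
  | [], used => some used
  | j :: js, used =>
    if n ≤ j ∨ PySem.List.pyGetD line j 0 ≠ PySem.List.pyGetD line (i+1) 0 ∨ PySem.List.pyGetD used j false = true then
      none
    else can_travel_down line n i js (PySem.List.pySetD used j true)

def can_travel_loop (line : List Int) (L n : Int) : List Int → List Bool → Bool
  | [], _ => true
  | i :: is, used =>
    if PySem.List.pyGetD line i 0 = PySem.List.pyGetD line (i+1) 0 then
      can_travel_loop line L n is used
    else if PySem.List.pyGetD line i 0 + 1 = PySem.List.pyGetD line (i+1) 0 then
      match can_travel_up line i (PySem.List.pyRange i (i - L) (-1)) used with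
      | none => false
      | some used' => can_travel_loop line L n is used'
    else if PySem.List.pyGetD line i 0 - 1 = PySem.List.pyGetD line (i+1) 0 then
      match can_travel_down line n i (PySem.List.pyRange (i+1) (i+L+1) 1) used with
      | none => false
      | some used' => can_travel_loop line L n is used'
    else false

def can_travel (line : List Int) (L : Int) : Bool :=
  can_travel_loop line L (PySem.List.len line) (PySem.List.pyRange 0 (PySem.List.len line - 1) 1) (List.replicate line.length false)

-- ===== PORT B =====
-- B, transliterated: one pass over line[1:] with state (prev, run, consumed)
def can_travel_alt_loop (L : Int) : List Int → Int → Int → Int → Bool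
  | [], _, run, consumed => decide (consumed ≤ run)
  | x :: xs, prev, run, consumed =>
    let d := x - prev
    if d = 0 then can_travel_alt_loop L xs x (run + 1) consumed
    else if d = 1 then
      if run - consumed < L then false else can_travel_alt_loop L xs x 1 0
    else if d = -1 then
      if run < consumed then false else can_travel_alt_loop L xs x 1 L
    else false

def can_travel_alt (line : List Int) (L : Int) : Bool :=
  match line with
  | [] => true
  | x :: xs => can_travel_alt_loop L xs x 1 0


-- ===== PRECONDITION & SPEC =====
def Spec_can_travel (line : List Int) (L : Int) (out : Bool) : Prop := out = can_travel_alt line L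
instance (line : List Int) (L : Int) (out : Bool) : Decidable (Spec_can_travel line L out) := by unfold Spec_can_travel; infer_instance

-- ===== CLAIM (what is proved, stated in full; the proofs are below) =====
def Claim_equal_can_travel : Prop := ∀ (line : List Int) (L : Int), Dom_can_travel line L → Spec_can_travel line L (can_travel line L)

-- ===== LEMMAS AND PROOFS =====

def markRange (used : List Bool) (a b : Int) : List Bool :=
  used.zipIdx.map (fun p => p.1 || decide (a ≤ (p.2 : Int) ∧ (p.2 : Int) < b))

theorem length_markRange (used : List Bool) (a b : Int) : (markRange used a b).length = used.length := by
  simp [markRange]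

theorem getElem_markRange (used : List Bool) (a b : Int) (k : Nat) (hk : k < (markRange used a b).length) :
    (markRange used a b)[k] = (used[k]'(by simpa [length_markRange] using hk) || decide (a ≤ (k : Int) ∧ (k : Int) < b)) := by
  simp [markRange]

theorem pyGetD_markRange (used : List Bool) (a b j : Int) (h0 : 0 ≤ j) (hj : j < (used.length : Int)) :
    PySem.List.pyGetD (markRange used a b) j false
      = (PySem.List.pyGetD used j false || decide (a ≤ j ∧ j < b)) := by
  rw [PySem.List.pyGetD_eq_getElem (markRange used a b) false h0 (by rw [length_markRange]; exact hj),
      PySem.List.pyGetD_eq_getElem used false h0 hj]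
  rw [getElem_markRange used a b j.toNat (by simp [length_markRange]; omega)]
  have hq : ((j.toNat : Int)) = j := by omega
  rw [hq]

theorem markRange_empty (used : List Bool) (a b : Int) (h : b ≤ a) : markRange used a b = used := by
  apply List.ext_getElem (by simp [length_markRange])
  intro k h1 h2
  rw [getElem_markRange used a b k h1]
  have : ¬(a ≤ (k : Int) ∧ (k : Int) < b) := by omega
  simp [this]

theorem markRange_set_left (used : List Bool) (a b : Int) (h0 : 0 ≤ a) (hl : a < (used.length : Int)) (hab : a < b) :
    markRange (PySem.List.pySetD used a true) (a+1) b = markRange used a b := by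
  rw [PySem.List.pySetD_of_nonneg used true h0]
  apply List.ext_getElem (by simp [length_markRange])
  intro k h1 h2
  rw [getElem_markRange _ _ _ k h1, getElem_markRange _ _ _ k (by simpa [length_markRange] using h2)]
  rw [List.getElem_set]
  by_cases hk : a.toNat = k
  · rw [if_pos hk]
    have hak : a = (k : Int) := by omega
    have hyes : a ≤ (k:Int) ∧ (k:Int) < b := by omega
    simp [hyes]
  · rw [if_neg hk]
    congr 1
    simp only [decide_eq_decide]
    omega

theorem markRange_set_right (used : List Bool) (a j : Int) (h0 : 0 ≤ j) (hl : j < (used.length : Int)) (ha : a ≤ j) :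
    markRange (PySem.List.pySetD used j true) a j = markRange used a (j+1) := by
  rw [PySem.List.pySetD_of_nonneg used true h0]
  apply List.ext_getElem (by simp [length_markRange])
  intro k h1 h2
  rw [getElem_markRange _ _ _ k h1, getElem_markRange _ _ _ k (by simpa [length_markRange] using h2)]
  rw [List.getElem_set]
  by_cases hk : j.toNat = k
  · rw [if_pos hk]
    have hjk : j = (k : Int) := by omega
    have hyes : a ≤ (k:Int) ∧ (k:Int) < j+1 := by omega
    simp [hyes]
  · rw [if_neg hk]
    congr 1
    simp only [decide_eq_decide]
    omega

theorem up_succ_go (line : List Int) (i s c e : Int)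
    (h0s : 0 ≤ s) (hsi : s ≤ i) (hin : i < (line.length : Int)) (hc0 : 0 ≤ c)
    (hrun : ∀ q : Int, s ≤ q → q ≤ i → PySem.List.pyGetD line q 0 = PySem.List.pyGetD line s 0)
    (he : s + c ≤ e + 1) :
    ∀ (k : Nat) (j : Int) (used : List Bool), (j - e).toNat = k →
    used.length = line.length → j ≤ i →
    (∀ q : Int, s ≤ q → q < (line.length : Int) →
        PySem.List.pyGetD used q false = decide (q < s + c ∨ (j < q ∧ q ≤ i))) →
    can_travel_up line i (PySem.List.pyRange j e (-1)) used = some (markRange used (e+1) (j+1)) := by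
  intro k
  induction k with
  | zero =>
    intro j used hk hlen hji hused
    rw [PySem.List.pyRange_neg_one_eq_nil (by omega)]
    rw [markRange_empty used (e+1) (j+1) (by omega)]
    rfl
  | succ k ih =>
    intro j used hk hlen hji hused
    have hej : e < j := by omega
    rw [PySem.List.pyRange_neg_one_cons hej]
    have hjs : s ≤ j := by omega
    have hjc : ¬ (j < s + c) := by omega
    have husedj : PySem.List.pyGetD used j false = false := by
      rw [hused j hjs (by omega)]; simp; omega
    have hline : PySem.List.pyGetD line j 0 = PySem.List.pyGetD line i 0 := by
      rw [hrun j hjs hji, hrun i (by omega) (by omega)]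
    rw [can_travel_up, if_neg (by
      push_neg
      refine ⟨by omega, by rw [hline], by rw [husedj]; simp⟩)]
    rw [ih (j-1) (PySem.List.pySetD used j true) (by omega)
          (by rw [PySem.List.pySetD_of_nonneg used true (by omega)]; simp [hlen]) (by omega)
          ?_]
    · have hj1 : j - 1 + 1 = j := by omega
      rw [hj1, markRange_set_right used (e+1) j (by omega) (by omega) (by omega)]
    · intro q hq hql
      rw [PySem.List.pySetD_of_nonneg used true (by omega)]
      by_cases hqj : q = j
      · subst hqj
        rw [PySem.List.pyGetD_eq_getElem _ false (by omega) (by simp [List.length_set, hlen]; omega)]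
        rw [List.getElem_set]
        rw [if_pos (by omega)]
        simp
        omega
      · have : PySem.List.pyGetD (used.set j.toNat true) q false = PySem.List.pyGetD used q false := by
          by_cases hq0 : 0 ≤ q
          · rw [PySem.List.pyGetD_eq_getElem _ false hq0 (by simpa [List.length_set, hlen] using hql),
                PySem.List.pyGetD_eq_getElem used false hq0 (by simpa [hlen] using hql)]
            rw [List.getElem_set, if_neg (by omega)]
          · omega
        rw [this, hused q hq hql]
        simp only [decide_eq_decide]
        omega

theorem up_fail_go (line : List Int) (i s c e : Int)
    (h0s : 0 ≤ s) (hsi : s ≤ i) (hin : i < (line.length : Int)) (hc0 : 0 ≤ c)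
    (hrun : ∀ q : Int, s ≤ q → q ≤ i → PySem.List.pyGetD line q 0 = PySem.List.pyGetD line s 0)
    (hstart : 0 < s → PySem.List.pyGetD line (s-1) 0 ≠ PySem.List.pyGetD line s 0)
    (he : e + 1 < s + c ∨ (c = 0 ∧ e + 1 < s)) :
    ∀ (k : Nat) (j : Int) (used : List Bool), (j - (s + c - 1)).toNat = k →
    used.length = line.length → j ≤ i → s + c - 1 ≤ j →
    (∀ q : Int, s ≤ q → q < (line.length : Int) →
        PySem.List.pyGetD used q false = decide (q < s + c ∨ (j < q ∧ q ≤ i))) →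
    can_travel_up line i (PySem.List.pyRange j e (-1)) used = none := by
  intro k
  induction k with
  | zero =>
    intro j used hk hlen hji hjc hused
    have hj : j = s + c - 1 := by omega
    have hej : e < j := by omega
    rw [PySem.List.pyRange_neg_one_cons hej]
    by_cases hc : 0 < c
    · -- j ≥ s and used[j] is true
      rw [can_travel_up, if_pos ?_]
      right; right
      rw [hused j (by omega) (by omega)]
      simp; omega
    · -- c = 0, j = s - 1
      have hcz : c = 0 := by omega
      by_cases hs0 : 0 < s
      · rw [can_travel_up, if_pos ?_]
        right; left
        have : j = s - 1 := by omega
        rw [this, hrun i (by omega) (by omega)]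
        exact hstart hs0
      · rw [can_travel_up, if_pos ?_]
        left; omega
  | succ k ih =>
    intro j used hk hlen hji hjc hused
    have hej : e < j := by omega
    rw [PySem.List.pyRange_neg_one_cons hej]
    have hjs : s ≤ j := by omega
    have husedj : PySem.List.pyGetD used j false = false := by
      rw [hused j hjs (by omega)]; simp; omega
    have hline : PySem.List.pyGetD line j 0 = PySem.List.pyGetD line i 0 := by
      rw [hrun j hjs hji, hrun i (by omega) (by omega)]
    rw [can_travel_up, if_neg (by
      push_neg
      refine ⟨by omega, by rw [hline], by rw [husedj]; simp⟩)]
    apply ih (j-1) (PySem.List.pySetD used j true) (by omega)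
      (by rw [PySem.List.pySetD_of_nonneg used true (by omega)]; simp [hlen]) (by omega) (by omega)
    intro q hq hql
    rw [PySem.List.pySetD_of_nonneg used true (by omega)]
    by_cases hqj : q = j
    · subst hqj
      rw [PySem.List.pyGetD_eq_getElem _ false (by omega) (by simp [List.length_set, hlen]; omega)]
      rw [List.getElem_set, if_pos (by omega)]
      simp; omega
    · have heq : PySem.List.pyGetD (used.set j.toNat true) q false = PySem.List.pyGetD used q false := by
        by_cases hq0 : 0 ≤ q
        · rw [PySem.List.pyGetD_eq_getElem _ false hq0 (by simpa [List.length_set, hlen] using hql),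
              PySem.List.pyGetD_eq_getElem used false hq0 (by simpa [hlen] using hql)]
          rw [List.getElem_set, if_neg (by omega)]
        · omega
      rw [heq, hused q hq hql]
      simp only [decide_eq_decide]
      omega

theorem down_succ_go (line : List Int) (n i b : Int) (hn : n = (line.length : Int)) :
    ∀ (k : Nat) (a : Int) (used : List Bool), (b - a).toNat = k →
    used.length = line.length → 0 ≤ a →
    (∀ q : Int, a ≤ q → q < b → q < n ∧ PySem.List.pyGetD line q 0 = PySem.List.pyGetD line (i+1) 0) →
    (∀ q : Int, a ≤ q → q < (line.length : Int) → PySem.List.pyGetD used q false = false) →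
    can_travel_down line n i (PySem.List.pyRange a b 1) used = some (markRange used a b) := by
  intro k
  induction k with
  | zero =>
    intro a used hk hlen ha hgood hfree
    rw [PySem.List.pyRange_one_eq_nil (by omega)]
    rw [markRange_empty used a b (by omega)]
    rfl
  | succ k ih =>
    intro a used hk hlen ha hgood hfree
    have hab : a < b := by omega
    rw [PySem.List.pyRange_one_cons hab]
    obtain ⟨han, hah⟩ := hgood a (le_refl a) hab
    rw [can_travel_down, if_neg (by
      push_neg
      refine ⟨by omega, by rw [hah], by rw [hfree a (le_refl a) (by omega)]; simp⟩)]
    rw [ih (a+1) (PySem.List.pySetD used a true) (by omega)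
          (by rw [PySem.List.pySetD_of_nonneg used true ha]; simp [hlen]) (by omega)
          (fun q hq hqb => hgood q (by omega) hqb) ?_]
    · rw [markRange_set_left used a b ha (by omega) hab]
    · intro q hq hql
      rw [PySem.List.pySetD_of_nonneg used true ha]
      rw [PySem.List.pyGetD_eq_getElem _ false (by omega) (by simp [List.length_set, hlen]; omega)]
      rw [List.getElem_set, if_neg (by omega)]
      rw [← PySem.List.pyGetD_eq_getElem used false (by omega) (by simpa [hlen] using hql)]
      exact hfree q (by omega) hql

theorem down_fail_go (line : List Int) (n i b : Int) (hn : n = (line.length : Int)) :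
    ∀ (k : Nat) (a : Int) (used : List Bool), (b - a).toNat = k →
    used.length = line.length → 0 ≤ a →
    (∃ q : Int, a ≤ q ∧ q < b ∧ (n ≤ q ∨ PySem.List.pyGetD line q 0 ≠ PySem.List.pyGetD line (i+1) 0)) →
    (∀ q : Int, a ≤ q → q < (line.length : Int) → PySem.List.pyGetD used q false = false) →
    can_travel_down line n i (PySem.List.pyRange a b 1) used = none := by
  intro k
  induction k with
  | zero =>
    intro a used hk hlen ha hbad hfree
    obtain ⟨q, hq1, hq2, _⟩ := hbad
    omega
  | succ k ih =>
    intro a used hk hlen ha hbad hfree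
    obtain ⟨q, hq1, hq2, hq3⟩ := hbad
    have hab : a < b := by omega
    rw [PySem.List.pyRange_one_cons hab]
    by_cases hbada : n ≤ a ∨ PySem.List.pyGetD line a 0 ≠ PySem.List.pyGetD line (i+1) 0
    · rw [can_travel_down, if_pos (by
        rcases hbada with h | h
        · exact Or.inl h
        · exact Or.inr (Or.inl h))]
    · push_neg at hbada
      obtain ⟨han, hah⟩ := hbada
      rw [can_travel_down, if_neg (by
        push_neg
        refine ⟨han, by rw [hah], by rw [hfree a (le_refl a) (by omega)]; simp⟩)]
      apply ih (a+1) (PySem.List.pySetD used a true) (by omega)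
        (by rw [PySem.List.pySetD_of_nonneg used true ha]; simp [hlen]) (by omega)
        ⟨q, by
          refine ⟨?_, hq2, hq3⟩
          rcases hq3 with h | h
          · omega
          · by_cases hqa : q = a
            · subst hqa; exact absurd hah h
            · omega⟩
      intro q' hq' hql
      rw [PySem.List.pySetD_of_nonneg used true ha]
      rw [PySem.List.pyGetD_eq_getElem _ false (by omega) (by simp [List.length_set, hlen]; omega)]
      rw [List.getElem_set, if_neg (by omega)]
      rw [← PySem.List.pyGetD_eq_getElem used false (by omega) (by simpa [hlen] using hql)]
      exact hfree q' (by omega) hql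

-- length of the maximal prefix of xs equal to p
def eqCount (p : Int) : List Int → Nat
  | [] => 0
  | x :: xs => if x = p then eqCount p xs + 1 else 0

theorem eqCount_le_length (p : Int) (xs : List Int) : eqCount p xs ≤ xs.length := by
  induction xs with
  | nil => simp [eqCount]
  | cons x xs ih => by_cases h : x = p <;> simp [eqCount, h] <;> omega

theorem eqCount_le_of_ne (p : Int) (xs : List Int) (k : Nat) (hk : k < xs.length) (hne : xs[k] ≠ p) :
    eqCount p xs ≤ k := by
  induction xs generalizing k with
  | nil => simp at hk
  | cons x xs ih =>
    by_cases h : x = p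
    · cases k with
      | zero => simp [h] at hne
      | succ k => simpa [eqCount, h] using ih k (by simpa using hk) (by simpa using hne)
    · simp [eqCount, h]

-- B's loop is doomed once the pending down-ramp cannot fit in the current run
theorem alt_doomed (L : Int) (xs : List Int) (prev run c : Int) (hL : 0 < L) (hc : c = L)
    (hlt : run + (eqCount prev xs : Int) < c) : can_travel_alt_loop L xs prev run c = false := by
  induction xs generalizing prev run with
  | nil => simp [can_travel_alt_loop, eqCount] at hlt ⊢; omega
  | cons x xs ih =>
    by_cases h : x = prev
    · subst h
      simp only [can_travel_alt_loop, sub_self, if_pos rfl]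
      exact ih x (run + 1) (by simp [eqCount] at hlt; omega)
    · have hd : x - prev ≠ 0 := by omega
      have hlt' : run < c := by simp [eqCount, h] at hlt; omega
      simp only [can_travel_alt_loop, if_neg hd]
      split_ifs with h1 h2 <;> simp_all <;> omega

theorem pyGetD_replicate_false (k : Nat) (q : Int) (h0 : 0 ≤ q) (hq : q < (k:Int)) :
    PySem.List.pyGetD (List.replicate k false) q false = false := by
  rw [PySem.List.pyGetD_eq_getElem _ false h0 (by simp; omega)]
  simp

theorem main_inv (zs : List Int) (L : Int) :
    ∀ (k : Nat) (i s c : Int) (used : List Bool),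
    ((zs.length : Int) - 1 - i).toNat = k →
    used.length = zs.length →
    0 ≤ s → s ≤ i → i < (zs.length : Int) →
    (c = 0 ∨ c = L) →
    s + c ≤ (zs.length : Int) →
    (∀ q : Int, s ≤ q → q ≤ i → PySem.List.pyGetD zs q 0 = PySem.List.pyGetD zs s 0) →
    (0 < s → PySem.List.pyGetD zs (s-1) 0 ≠ PySem.List.pyGetD zs s 0) →
    (∀ q : Int, s ≤ q → q < s + c → PySem.List.pyGetD zs q 0 = PySem.List.pyGetD zs s 0) →
    (∀ q : Int, s ≤ q → q < (zs.length : Int) → PySem.List.pyGetD used q false = decide (q < s + c)) →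
    can_travel_loop zs L (zs.length : Int) (PySem.List.pyRange i ((zs.length : Int) - 1) 1) used
      = can_travel_alt_loop L (zs.drop (i+1).toNat) (PySem.List.pyGetD zs i 0) (i - s + 1) c := by
  intro k
  induction k with
  | zero =>
    intro i s c used hk hlen h0s hsi hin hcL hcn hrun hstart hcons hused
    rw [PySem.List.pyRange_one_eq_nil (by omega)]
    have hdrop : zs.drop (i+1).toNat = [] := by
      apply List.drop_eq_nil_of_le; omega
    rw [hdrop, can_travel_loop, can_travel_alt_loop]
    have : c ≤ i - s + 1 := by omega
    simp [this]
  | succ k ih =>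
    intro i s c used hk hlen h0s hsi hin hcL hcn hrun hstart hcons hused
    have hin1 : i + 1 < (zs.length : Int) := by omega
    rw [PySem.List.pyRange_one_cons (by omega)]
    have hdrop : zs.drop (i+1).toNat = zs[(i+1).toNat] :: zs.drop ((i+1).toNat + 1) :=
      List.drop_eq_getElem_cons (by omega)
    have hY : PySem.List.pyGetD zs (i+1) 0 = zs[(i+1).toNat] :=
      PySem.List.pyGetD_eq_getElem zs 0 (by omega) (by omega)
    have hnat : (i+1).toNat + 1 = (i+2).toNat := by omega
    rw [hdrop, hnat, ← hY]
    simp only [can_travel_loop, can_travel_alt_loop]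
    by_cases hXY : PySem.List.pyGetD zs i 0 = PySem.List.pyGetD zs (i+1) 0
    · -- equal heights: both continue
      rw [if_pos hXY]
      have hd0 : PySem.List.pyGetD zs (i+1) 0 - PySem.List.pyGetD zs i 0 = 0 := by omega
      rw [if_pos hd0]
      have hih := ih (i+1) s c used (by omega) hlen h0s (by omega) hin1 hcL hcn
        (fun q hq1 hq2 => by
          by_cases hq : q = i + 1
          · subst hq; rw [← hXY]; exact hrun i hsi le_rfl
          · exact hrun q hq1 (by omega))
        hstart hcons hused
      rw [show ((i:Int)+1+1) = i+2 from by ring, show ((i:Int)+1-s+1) = i-s+1+1 from by ring] at hih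
      exact hih
    · -- a boundary: the consumed region cannot reach past i
      have hsci : s + c ≤ i + 1 := by
        by_contra hcon
        exact hXY ((hrun i hsi le_rfl).trans (hcons (i+1) (by omega) (by omega)).symm)
      rw [if_neg hXY]
      have hd0 : ¬ (PySem.List.pyGetD zs (i+1) 0 - PySem.List.pyGetD zs i 0 = 0) := by omega
      rw [if_neg hd0]
      by_cases hup : PySem.List.pyGetD zs i 0 + 1 = PySem.List.pyGetD zs (i+1) 0
      · -- up-ramp
        rw [if_pos hup]
        have hd1 : PySem.List.pyGetD zs (i+1) 0 - PySem.List.pyGetD zs i 0 = 1 := by omega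
        rw [if_pos hd1]
        by_cases hL : 0 < L
        · have hc0 : 0 ≤ c := by omega
          by_cases hfit : s + c ≤ i - L + 1
          · -- A's backward scan succeeds; B's guard passes
            have hsucc := up_succ_go zs i s c (i - L) h0s hsi hin hc0 hrun (by omega)
              (i - (i - L)).toNat i used rfl hlen le_rfl
              (fun q hq1 hq2 => by rw [hused q hq1 hq2]; simp only [decide_eq_decide]; omega)
            rw [hsucc]
            rw [if_neg (by omega)]
            have hih := ih (i+1) (i+1) 0 (markRange used (i - L + 1) (i + 1)) (by omega)
              (by rw [length_markRange]; exact hlen) (by omega) le_rfl hin1 (Or.inl rfl) (by omega)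
              (fun q hq1 hq2 => by have : q = i + 1 := by omega
                                   rw [this])
              (fun _ => by have : i + 1 - 1 = i := by omega
                           rw [this]; exact hXY)
              (fun q hq1 hq2 => absurd hq2 (by omega))
              (fun q hq1 hq2 => by
                rw [pyGetD_markRange used _ _ q (by omega) (by omega)]
                rw [hused q (by omega) hq2]
                rw [← Bool.decide_or]
                simp only [decide_eq_decide]
                omega)
            rw [show ((i:Int)+1+1) = i+2 from by ring, show ((i:Int)+1-(i+1)+1) = 1 from by ring] at hih
            exact hih
          · -- A's backward scan fails; B's guard fails
            have hfail := up_fail_go zs i s c (i - L) h0s hsi hin hc0 hrun hstart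
              (Or.inl (by omega)) (i - (s + c - 1)).toNat i used rfl hlen le_rfl (by omega)
              (fun q hq1 hq2 => by rw [hused q hq1 hq2]; simp only [decide_eq_decide]; omega)
            rw [hfail]
            rw [if_pos (by omega)]
        · -- L ≤ 0: empty scan, trivially fine on both sides
          rw [PySem.List.pyRange_neg_one_eq_nil (by omega)]
          rw [show can_travel_up zs i [] used = some used from rfl]
          rw [if_neg (by omega)]
          have hih := ih (i+1) (i+1) 0 used (by omega) hlen (by omega) le_rfl hin1 (Or.inl rfl) (by omega)
            (fun q hq1 hq2 => by have : q = i + 1 := by omega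
                                 rw [this])
            (fun _ => by have : i + 1 - 1 = i := by omega
                         rw [this]; exact hXY)
            (fun q hq1 hq2 => absurd hq2 (by omega))
            (fun q hq1 hq2 => by
              rw [hused q (by omega) hq2]
              simp only [decide_eq_decide]; omega)
          rw [show ((i:Int)+1+1) = i+2 from by ring, show ((i:Int)+1-(i+1)+1) = 1 from by ring] at hih
          exact hih
      · rw [if_neg hup]
        have hd1 : ¬ (PySem.List.pyGetD zs (i+1) 0 - PySem.List.pyGetD zs i 0 = 1) := by omega
        rw [if_neg hd1]
        by_cases hdn : PySem.List.pyGetD zs i 0 - 1 = PySem.List.pyGetD zs (i+1) 0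
        · -- down-ramp
          rw [if_pos hdn]
          have hdm1 : PySem.List.pyGetD zs (i+1) 0 - PySem.List.pyGetD zs i 0 = -1 := by omega
          rw [if_pos hdm1]
          rw [if_neg (show ¬ (i - s + 1 < c) by omega)]
          have hfree : ∀ q : Int, i + 1 ≤ q → q < (zs.length : Int) →
              PySem.List.pyGetD used q false = false := fun q hq1 hq2 => by
            rw [hused q (by omega) hq2]; simp; omega
          by_cases hL : 0 < L
          · by_cases hgood : ∀ q : Int, i + 1 ≤ q → q < i + L + 1 →
                q < (zs.length : Int) ∧ PySem.List.pyGetD zs q 0 = PySem.List.pyGetD zs (i+1) 0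
            · -- A's forward scan succeeds
              have hsucc := down_succ_go zs (zs.length : Int) i (i + L + 1) rfl
                ((i + L + 1) - (i + 1)).toNat (i + 1) used rfl hlen (by omega) hgood hfree
              rw [hsucc]
              have hlen2 : i + 1 + L ≤ (zs.length : Int) := by
                have := (hgood (i + L) (by omega) (by omega)).1
                omega
              have hih := ih (i+1) (i+1) L (markRange used (i+1) (i+L+1)) (by omega)
                (by rw [length_markRange]; exact hlen) (by omega) le_rfl hin1 (Or.inr rfl) hlen2
                (fun q hq1 hq2 => by have : q = i + 1 := by omega
                                     rw [this])
                (fun _ => by have : i + 1 - 1 = i := by omega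
                             rw [this]; exact hXY)
                (fun q hq1 hq2 => (hgood q hq1 (by omega)).2)
                (fun q hq1 hq2 => by
                  rw [pyGetD_markRange used _ _ q (by omega) (by omega)]
                  rw [hused q (by omega) hq2]
                  rw [← Bool.decide_or]
                  simp only [decide_eq_decide]
                  omega)
              rw [show ((i:Int)+1+1) = i+2 from by ring, show ((i:Int)+1-(i+1)+1) = 1 from by ring] at hih
              exact hih
            · -- A's forward scan fails; B is doomed
              push_neg at hgood
              obtain ⟨q, hq1, hq2, hbad⟩ := hgood
              have hbad' : (zs.length : Int) ≤ q ∨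
                  (q < (zs.length : Int) ∧ PySem.List.pyGetD zs q 0 ≠ PySem.List.pyGetD zs (i+1) 0) := by
                by_cases hql : q < (zs.length : Int)
                · exact Or.inr ⟨hql, hbad hql⟩
                · exact Or.inl (by omega)
              have hfail := down_fail_go zs (zs.length : Int) i (i + L + 1) rfl
                ((i + L + 1) - (i + 1)).toNat (i + 1) used rfl hlen (by omega)
                ⟨q, hq1, hq2, (by rcases hbad' with h | h; exacts [Or.inl h, Or.inr h.2])⟩ hfree
              rw [hfail]
              -- B continues but the pending down-ramp cannot fit
              apply (alt_doomed L (zs.drop (i+2).toNat) (PySem.List.pyGetD zs (i+1) 0) 1 L hL rfl ?_).symm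
              have hlen3 : (zs.drop (i+2).toNat).length = zs.length - (i+2).toNat := by
                simp
              rcases hbad' with hbig | ⟨hq3, hne⟩
              · -- the scan runs off the end of the zs
                have h1 := eqCount_le_length (PySem.List.pyGetD zs (i+1) 0) (zs.drop (i+2).toNat)
                rw [hlen3] at h1
                omega
              · -- some cell among the next L differs in height
                have hqi2 : i + 2 ≤ q := by
                  by_cases hq : q = i + 1
                  · subst hq; exact absurd rfl hne
                  · omega
                have hkbound : (q - (i+2)).toNat < (zs.drop (i+2).toNat).length := by
                  rw [hlen3]; omega
                have hxs : (zs.drop (i+2).toNat)[(q - (i+2)).toNat] = zs[q.toNat] := by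
                  rw [List.getElem_drop]
                  congr 1
                  omega
                have hqv : PySem.List.pyGetD zs q 0 = zs[q.toNat] :=
                  PySem.List.pyGetD_eq_getElem zs 0 (by omega) (by omega)
                have h2 := eqCount_le_of_ne (PySem.List.pyGetD zs (i+1) 0)
                  (zs.drop (i+2).toNat) (q - (i+2)).toNat hkbound
                  (by rw [hxs, ← hqv]; exact hne)
                omega
          · -- L ≤ 0: empty scan on A's side, consumed ≤ 0 on B's
            rw [PySem.List.pyRange_one_eq_nil (by omega)]
            rw [show can_travel_down zs (zs.length : Int) i [] used = some used from rfl]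
            have hih := ih (i+1) (i+1) L used (by omega) hlen (by omega) le_rfl hin1 (Or.inr rfl) (by omega)
              (fun q hq1 hq2 => by have : q = i + 1 := by omega
                                   rw [this])
              (fun _ => by have : i + 1 - 1 = i := by omega
                           rw [this]; exact hXY)
              (fun q hq1 hq2 => absurd hq2 (by omega))
              (fun q hq1 hq2 => by
                rw [hused q (by omega) hq2]
                simp only [decide_eq_decide]; omega)
            rw [show ((i:Int)+1+1) = i+2 from by ring, show ((i:Int)+1-(i+1)+1) = 1 from by ring] at hih
            exact hih
        · -- height gap > 1: both fail
          rw [if_neg hdn]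
          have hdm1 : ¬ (PySem.List.pyGetD zs (i+1) 0 - PySem.List.pyGetD zs i 0 = -1) := by omega
          rw [if_neg hdm1]

theorem can_travel_eq_alt : ∀ (line : List Int) (L : Int), can_travel line L = can_travel_alt line L := by
  intro zs L
  cases zs with
  | nil => rfl
  | cons x xs =>
    have hmain := main_inv (x :: xs) L ((((x :: xs).length : Int) - 1 - 0).toNat) 0 0 0
      (List.replicate (x :: xs).length false) rfl (by simp) le_rfl le_rfl
      (by simp only [List.length_cons]; omega) (Or.inl rfl)
      (by simp only [List.length_cons]; omega)
      (fun q hq1 hq2 => by have : q = 0 := by omega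
                           rw [this])
      (fun h => absurd h (by omega))
      (fun q hq1 hq2 => absurd hq2 (by omega))
      (fun q hq1 hq2 => by
        rw [pyGetD_replicate_false (x :: xs).length q hq1 (by exact_mod_cast hq2)]
        simp
        omega)
    rw [can_travel, PySem.List.len_eq, hmain]
    rw [show ((0:Int)+1).toNat = 1 from rfl]
    rw [show ((0:Int)-0+1) = 1 from by ring]
    rw [show (x :: xs).drop 1 = xs from rfl]
    rw [PySem.List.pyGetD_zero_cons]
    rfl

-- ===== VERDICT (by name: the statement is the Claim_ definition above) =====
theorem can_travel_spec : Claim_equal_can_travel := by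
  intro line L _
  unfold Spec_can_travel
  exact can_travel_eq_alt line L
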